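-- pv_equiv track=rewrite | github.com/CDBiddulph/scaffold-learning | experiments/keep_crosswords_20250711_195402/scaffolds/5-1-2-1-1-0/scaffold.py | fill_answer
-- ===== SOURCE A (Python) =====
-- def find_clue_position(clue_num, grid):
--     """Find the starting position of a clue in the grid"""
--     height = len(grid)
--     width = len(grid[0]) if height > 0 else 0
--     current_num = 1
--
--     for row in range(height):
--         for col in range(width):
--             if grid[row][col] == ".":
--                 continue
--
--             starts_across = (
--                 (col == 0 or grid[row][col - 1] == ".")
--                 and col + 1 < width
--                 and grid[row][col + 1] != "."
--             )
--             starts_down = (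
--                 (row == 0 or grid[row - 1][col] == ".")
--                 and row + 1 < height
--                 and grid[row + 1][col] != "."
--             )
--
--             if starts_across or starts_down:
--                 if current_num == clue_num:
--                     return (row, col)
--                 current_num += 1
--
--     return None
--
-- def get_clue_info(clue_num, grid, direction):
--     """Get clue position and length"""
--     pos = find_clue_position(clue_num, grid)
--     if pos is None:
--         return None, None
--
--     row, col = pos
--     height = len(grid)
--     width = len(grid[0]) if height > 0 else 0
--
--     length = 0
--     if direction == 'across':
--         for c in range(col, width):
--             if grid[row][c] == ".":
--                 break
--             length += 1
--     else:  # down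
--         for r in range(row, height):
--             if grid[r][col] == ".":
--                 break
--             length += 1
--
--     return pos, length
--
-- def fill_answer(clue_num, grid, direction, filled_grid, answer):
--     """Fill an answer into the filled grid"""
--     pos, length = get_clue_info(clue_num, grid, direction)
--     if pos is None or len(answer) != length:
--         return False
--
--     row, col = pos
--
--     if direction == 'across':
--         for i, letter in enumerate(answer):
--             filled_grid[row][col + i] = letter
--     else:  # down
--         for i, letter in enumerate(answer):
--             filled_grid[row + i][col] = letter
--
--     return True
-- ===== SOURCE B (Python) =====
-- def _runs(cells):
--     """Maximal runs of consecutive non-'.' cells as (start, end) index pairs."""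
--     runs = []
--     i, n = 0, len(cells)
--     while i < n:
--         if cells[i] == ".":
--             i += 1
--         else:
--             j = i
--             while j < n and cells[j] != ".":
--                 j += 1
--             runs.append((i, j))
--             i = j
--     return runs
--
--
-- def fill_answer(clue_num, grid, direction, filled_grid, answer):
--     """Fill an answer into the filled grid (run-decomposition version).
--
--     Decomposes every row and every column into maximal runs of open cells;
--     a cell numbered as a clue start is exactly a start of a run of length >= 2.
--     Clue numbers are assigned by position in the reading-order start list, and
--     word lengths are read off the run table instead of walking the grid.
--     """
--     height = len(grid)
--     width = len(grid[0]) if height else 0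
--     row_runs = [_runs(row[:width]) for row in grid]
--     col_runs = [_runs([grid[r][c] for r in range(height)]) for c in range(width)]
--     starts = []
--     for r in range(height):
--         across = [s for (s, e) in row_runs[r] if e - s >= 2]
--         down = [c for c in range(width) if any(s == r and e - s >= 2 for (s, e) in col_runs[c])]
--         for c in sorted(set(across) | set(down)):
--             starts.append((r, c))
--     if not (1 <= clue_num <= len(starts)):
--         return False
--     row, col = starts[clue_num - 1]
--     if direction == 'across':
--         length = next(e - col for (s, e) in row_runs[row] if s <= col < e)
--     else:
--         length = next(e - row for (s, e) in col_runs[col] if s <= row < e)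
--     if len(answer) != length:
--         return False
--     for i, letter in enumerate(answer):
--         if direction == 'across':
--             filled_grid[row][col + i] = letter
--         else:
--             filled_grid[row + i][col] = letter
--     return True
-- ===== Notes on version B (the rewrite author's own statement) =====
-- stated objective: alternative
-- what changed: Replaces the per-cell neighbour-test numbering scan with early return and the walk-to-measure helpers by a run decomposition of every row and column: clue starts are exactly the starts of runs of length >= 2, numbered by position in the reading-order start list (built per row from sorted(set(across)|set(down))), and word lengths are read off the run table.
-- outside the precondition, e.g. on fill_answer(1, [['A', 'B'], ['C']], 'across', [], 'X'): A returns False, B raises IndexError; on fill_answer(1, [['A', 'B', '.'], ['C', 'D', '.']], 'across', [], 'X'): A returns False, B returns False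
import Mathlib
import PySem

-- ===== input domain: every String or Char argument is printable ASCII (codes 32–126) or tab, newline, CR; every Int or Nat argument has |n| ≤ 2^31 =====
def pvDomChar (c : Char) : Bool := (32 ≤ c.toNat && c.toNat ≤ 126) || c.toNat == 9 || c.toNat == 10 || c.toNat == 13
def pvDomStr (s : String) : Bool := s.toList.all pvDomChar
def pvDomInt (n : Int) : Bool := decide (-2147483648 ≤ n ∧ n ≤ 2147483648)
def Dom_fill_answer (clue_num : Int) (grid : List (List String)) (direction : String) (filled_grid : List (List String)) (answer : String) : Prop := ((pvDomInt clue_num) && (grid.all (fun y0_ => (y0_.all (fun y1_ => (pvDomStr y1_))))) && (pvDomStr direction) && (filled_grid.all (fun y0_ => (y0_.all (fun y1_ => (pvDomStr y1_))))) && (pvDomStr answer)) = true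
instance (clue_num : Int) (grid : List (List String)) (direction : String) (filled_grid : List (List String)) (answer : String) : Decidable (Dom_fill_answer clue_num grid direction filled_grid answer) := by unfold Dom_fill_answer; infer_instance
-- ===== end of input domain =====

-- B replaces A's cell-by-cell numbering scan (neighbour tests + early return) with a run
-- decomposition of every row and column: clue starts are the starts of runs of length ≥ 2,
-- numbered by position in the reading-order start list, and word lengths are read off the run
-- table. Both Pythons mutate filled_grid identically on success; the equivalence proved here is
-- about the RETURN value only (the Lean ports return the Bool).

-- shared Python-indexing helper: grid[r][c] with the default used only out of range
def pvCell (grid : List (List String)) (r c : Nat) : String := (grid.getD r []).getD c ""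

-- width = len(grid[0]) if height > 0 else 0 (both Pythons compute this)
def pvWidth (grid : List (List String)) : Nat :=
  if grid.length > 0 then (grid.headD []).length else 0

-- ===== PORT A =====
def pvStartsAcross (grid : List (List String)) (width r c : Nat) : Bool :=
  ((c == 0) || (pvCell grid r (c - 1) == ".")) && decide (c + 1 < width) && (pvCell grid r (c + 1) != ".")

def pvStartsDown (grid : List (List String)) (height r c : Nat) : Bool :=
  ((r == 0) || (pvCell grid (r - 1) c == ".")) && decide (r + 1 < height) && (pvCell grid (r + 1) c != ".")

-- the cells visited by 'for row in range(height): for col in range(width):' in reading order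
def pvPairs (height width : Nat) : List (Nat × Nat) :=
  (List.range height).flatMap (fun r => (List.range width).map (fun c => (r, c)))

-- find_clue_position's scan with early return and running counter
def fcpLoop (clue_num : Int) (grid : List (List String)) (height width : Nat) :
    List (Nat × Nat) → Int → Option (Nat × Nat)
  | [], _ => none
  | (r, c) :: rest, cur =>
    if pvCell grid r c == "." then fcpLoop clue_num grid height width rest cur
    else if pvStartsAcross grid width r c || pvStartsDown grid height r c then
      if cur == clue_num then some (r, c)
      else fcpLoop clue_num grid height width rest (cur + 1)
    else fcpLoop clue_num grid height width rest cur

-- get_clue_info's 'for … in range(start, limit): if cell == ".": break; length += 1'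
def lenFrom (cellAt : Nat → String) (limit i : Nat) : Nat :=
  if i < limit then (if cellAt i == "." then 0 else lenFrom cellAt limit (i + 1) + 1) else 0
termination_by limit - i

def fill_answer (clue_num : Int) (grid : List (List String)) (direction : String) (filled_grid : List (List String)) (answer : String) : Bool :=
  match fcpLoop clue_num grid grid.length (pvWidth grid) (pvPairs grid.length (pvWidth grid)) 1 with
  | none => false
  | some (row, col) =>
    let length : Int :=
      if direction == "across" then lenFrom (fun c => pvCell grid row c) (pvWidth grid) col
      else lenFrom (fun r => pvCell grid r col) grid.length row
    if PySem.Str.len answer != (length : Int) then false else true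

-- ===== PORT B =====
-- inner 'while j < n and cells[j] != ".": j += 1' of _runs; the fuel argument is the
-- remaining distance to the end of the list, which bounds the iterations of the while loop
def runEndGo (cells : List String) : Nat → Nat → Nat
  | j, 0 => j
  | j, fuel + 1 =>
    if j < cells.length ∧ cells.getD j "" ≠ "." then runEndGo cells (j + 1) fuel else j

def runEnd (cells : List String) (j : Nat) : Nat := runEndGo cells j (cells.length - j)

-- outer while of _runs: maximal runs of non-'.' cells as (start, end) pairs (same fuel bound)
def runsFromGo (cells : List String) : Nat → Nat → List (Nat × Nat)
  | _, 0 => []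
  | i, fuel + 1 =>
    if i < cells.length then
      if cells.getD i "" = "." then runsFromGo cells (i + 1) fuel
      else (i, runEnd cells i) :: runsFromGo cells (runEnd cells i) fuel
    else []

def runsFrom (cells : List String) (i : Nat) : List (Nat × Nat) :=
  runsFromGo cells i (cells.length - i)

-- row[:width]
def sliceRow (row : List String) (w : Nat) : List String :=
  PySem.List.slice row none (some (w : Int))

-- [grid[r][c] for r in range(height)]
def colCells (grid : List (List String)) (h c : Nat) : List String :=
  (List.range h).map (fun r => pvCell grid r c)

-- row_runs / col_runs
def rowRunsOf (grid : List (List String)) (w : Nat) : List (List (Nat × Nat)) :=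
  grid.map (fun row => runsFrom (sliceRow row w) 0)

def colRunsOf (grid : List (List String)) (h w : Nat) : List (List (Nat × Nat)) :=
  (List.range w).map (fun c => runsFrom (colCells grid h c) 0)

-- sorted(set(across) | set(down)) for one row
def rowStartCols (rr cr : List (List (Nat × Nat))) (w r : Nat) : List Nat :=
  PySem.List.sorted
    (PySem.Set.union
      (PySem.Set.ofList (((rr.getD r []).filter (fun se => decide (2 ≤ se.2 - se.1))).map (fun se => se.1)))
      (PySem.Set.ofList ((List.range w).filter (fun c => (cr.getD c []).any (fun se => se.1 == r && decide (2 ≤ se.2 - se.1))))))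
    (fun x => x) false

def fill_answer_alt (clue_num : Int) (grid : List (List String)) (direction : String) (filled_grid : List (List String)) (answer : String) : Bool :=
  let h := grid.length
  let w := pvWidth grid
  let rr := rowRunsOf grid w
  let cr := colRunsOf grid h w
  let starts := (List.range h).foldl
    (fun acc r => acc ++ (rowStartCols rr cr w r).map (fun c => (r, c))) []
  if 1 ≤ clue_num ∧ clue_num ≤ (starts.length : Int) then
    let rc := starts.getD (clue_num - 1).toNat (0, 0)
    let length : Int :=
      if direction == "across" then
        -- next(e - col for (s, e) in row_runs[row] if s <= col < e); none = StopIteration,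
        -- unreachable: a numbered start cell always lies inside a run of its row
        match (rr.getD rc.1 []).find? (fun se => decide (se.1 ≤ rc.2) && decide (rc.2 < se.2)) with
        | some se => (se.2 : Int) - (rc.2 : Int)
        | none => 0
      else
        match (cr.getD rc.2 []).find? (fun se => decide (se.1 ≤ rc.1) && decide (rc.1 < se.2)) with
        | some se => (se.2 : Int) - (rc.1 : Int)
        | none => 0
    if PySem.Str.len answer != length then false else true
  else false

-- ===== PRECONDITION & SPEC =====
-- Pre_ excludes only inputs where the Python can raise IndexError: ragged grids (a row shorter
-- than row 0), where B's column extraction raises (A sometimes still returns there), and inputs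
-- where a successful fill is not already ruled out by the clue_num / answer-length bounds while
-- filled_grid does not cover grid's shape, where the in-place write can raise in both programs;
-- the latter condition is an over-approximation, so it also excludes some inputs on which both
-- programs just return False (see the cited examples in the claim).
def Pre_fill_answer (clue_num : Int) (grid : List (List String)) (direction : String) (filled_grid : List (List String)) (answer : String) : Prop :=
  (∀ row ∈ grid, (grid.headD []).length ≤ row.length) ∧
  (answer.toList.length = 0 ∨ clue_num < 1 ∨
   (grid.length : Int) * ((grid.headD []).length : Int) < clue_num ∨
   (direction = "across" ∧ (grid.headD []).length < answer.toList.length) ∨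
   (direction ≠ "across" ∧ grid.length < answer.toList.length) ∨
   (grid.length ≤ filled_grid.length ∧ ∀ row ∈ filled_grid, (grid.headD []).length ≤ row.length))
instance (clue_num : Int) (grid : List (List String)) (direction : String) (filled_grid : List (List String)) (answer : String) : Decidable (Pre_fill_answer clue_num grid direction filled_grid answer) := by unfold Pre_fill_answer; infer_instance

def pvWitness_fill_answer : Int × List (List String) × String × List (List String) × String :=
  (1, [["A", "B"]], "across", [["A", "B"]], "XY")

def Spec_fill_answer (clue_num : Int) (grid : List (List String)) (direction : String) (filled_grid : List (List String)) (answer : String) (out : Bool) : Prop := out = fill_answer_alt clue_num grid direction filled_grid answer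
instance (clue_num : Int) (grid : List (List String)) (direction : String) (filled_grid : List (List String)) (answer : String) (out : Bool) : Decidable (Spec_fill_answer clue_num grid direction filled_grid answer out) := by unfold Spec_fill_answer; infer_instance

-- ===== CLAIM =====
def Claim_equal_fill_answer : Prop := ∀ (clue_num : Int) (grid : List (List String)) (direction : String) (filled_grid : List (List String)) (answer : String), Dom_fill_answer clue_num grid direction filled_grid answer → Pre_fill_answer clue_num grid direction filled_grid answer → Spec_fill_answer clue_num grid direction filled_grid answer (fill_answer clue_num grid direction filled_grid answer)

-- ===== LEMMAS AND PROOFS =====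

-- the numbering predicate of A's scan, as one Bool on a cell
def isStart (grid : List (List String)) (h w : Nat) (rc : Nat × Nat) : Bool :=
  (pvCell grid rc.1 rc.2 != ".") && (pvStartsAcross grid w rc.1 rc.2 || pvStartsDown grid h rc.1 rc.2)

-- l[k] for a possibly negative Int index, as A's counter reaches it
def intIdx {α : Type} (l : List α) (k : Int) : Option α :=
  if 0 ≤ k then l[k.toNat]? else none

-- the defining equation of the inner while
theorem runEnd_eq (cells : List String) (j : Nat) :
    runEnd cells j =
      if j < cells.length ∧ cells.getD j "" ≠ "." then runEnd cells (j + 1) else j := by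
  rw [runEnd]
  by_cases hc : j < cells.length ∧ cells.getD j "" ≠ "."
  · rw [if_pos hc]
    have h1 : cells.length - j = (cells.length - (j + 1)) + 1 := by omega
    rw [h1]
    simp only [runEndGo]
    rw [if_pos hc]
    rfl
  · rw [if_neg hc]
    cases hn : cells.length - j with
    | zero => rfl
    | succ f => simp only [runEndGo]; rw [if_neg hc]

theorem le_runEndGo (cells : List String) (fuel : Nat) : ∀ j, j ≤ runEndGo cells j fuel := by
  induction fuel with
  | zero => intro j; exact Nat.le_refl j
  | succ f ih =>
    intro j
    simp only [runEndGo]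
    split
    · have := ih (j + 1); omega
    · exact Nat.le_refl j

theorem le_runEnd (cells : List String) (j : Nat) : j ≤ runEnd cells j :=
  le_runEndGo cells (cells.length - j) j

theorem lt_runEnd (cells : List String) (i : Nat) (h1 : i < cells.length)
    (h2 : cells.getD i "" ≠ ".") : i < runEnd cells i := by
  rw [runEnd_eq, if_pos ⟨h1, h2⟩]
  have := le_runEnd cells (i + 1); omega

theorem runsFromGo_irrel (cells : List String) (fuel1 : Nat) : ∀ (fuel2 i : Nat),
    cells.length - i ≤ fuel1 → cells.length - i ≤ fuel2 →
    runsFromGo cells i fuel1 = runsFromGo cells i fuel2 := by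
  induction fuel1 with
  | zero =>
    intro fuel2 i h1 h2
    cases fuel2 with
    | zero => rfl
    | succ f => simp only [runsFromGo]; rw [if_neg (by omega)]
  | succ f1 ih =>
    intro fuel2 i h1 h2
    cases fuel2 with
    | zero => simp only [runsFromGo]; rw [if_neg (by omega)]
    | succ f2 =>
      simp only [runsFromGo]
      by_cases hil : i < cells.length
      · rw [if_pos hil, if_pos hil]
        by_cases hdot : cells.getD i "" = "."
        · rw [if_pos hdot, if_pos hdot]
          exact ih f2 (i + 1) (by omega) (by omega)
        · rw [if_neg hdot, if_neg hdot]
          congr 1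
          have := lt_runEnd cells i hil hdot
          exact ih f2 (runEnd cells i) (by omega) (by omega)
      · rw [if_neg hil, if_neg hil]

-- the defining equation of the outer while
theorem runsFrom_eq (cells : List String) (i : Nat) :
    runsFrom cells i =
      if i < cells.length then
        (if cells.getD i "" = "." then runsFrom cells (i + 1)
         else (i, runEnd cells i) :: runsFrom cells (runEnd cells i))
      else [] := by
  rw [runsFrom]
  by_cases hil : i < cells.length
  · rw [if_pos hil]
    have h1 : cells.length - i = (cells.length - (i + 1)) + 1 := by omega
    rw [h1]
    simp only [runsFromGo]
    rw [if_pos hil]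
    by_cases hdot : cells.getD i "" = "."
    · rw [if_pos hdot, if_pos hdot]
      rfl
    · rw [if_neg hdot, if_neg hdot]
      congr 1
      rw [runsFrom]
      have := lt_runEnd cells i hil hdot
      exact runsFromGo_irrel cells _ _ _ (by omega) (by omega)
  · rw [if_neg hil]
    cases hn : cells.length - i with
    | zero => rfl
    | succ f => simp only [runsFromGo]; rw [if_neg hil]

theorem runEnd_le_len (cells : List String) (i : Nat) (hi : i ≤ cells.length) :
    runEnd cells i ≤ cells.length := by
  rw [runEnd_eq]
  split
  · exact runEnd_le_len cells (i + 1) (by omega)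
  · exact hi
termination_by cells.length - i
decreasing_by omega

theorem runEnd_stop (cells : List String) (i : Nat) :
    cells.length ≤ runEnd cells i ∨ cells.getD (runEnd cells i) "" = "." := by
  rw [runEnd_eq]
  split
  · exact runEnd_stop cells (i + 1)
  · next h => rcases Decidable.not_and_iff_or_not.mp h with h' | h'
              · left; omega
              · right; exact not_not.mp h'
termination_by cells.length - i
decreasing_by omega

theorem mem_of_lt_runEnd (cells : List String) (i k : Nat) (h1 : i ≤ k)
    (h2 : k < runEnd cells i) : k < cells.length ∧ cells.getD k "" ≠ "." := by
  rw [runEnd_eq] at h2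
  split at h2
  · next hc =>
    rcases Nat.eq_or_lt_of_le h1 with rfl | hlt
    · exact hc
    · exact mem_of_lt_runEnd cells (i + 1) k (by omega) h2
  · omega
termination_by cells.length - i
decreasing_by omega

theorem runEnd_congr (cells : List String) (i k : Nat) (h1 : i ≤ k)
    (h2 : k < runEnd cells i) : runEnd cells k = runEnd cells i := by
  rcases Nat.eq_or_lt_of_le h1 with rfl | hlt
  · rfl
  · have hm := mem_of_lt_runEnd cells i i (le_refl i) (lt_of_le_of_lt h1 h2)
    have he : runEnd cells i = runEnd cells (i + 1) := by
      conv_lhs => rw [runEnd_eq]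
      rw [if_pos ⟨hm.1, hm.2⟩]
    rw [he]
    exact runEnd_congr cells (i + 1) k hlt (he ▸ h2)
termination_by cells.length - i
decreasing_by omega

theorem two_le_runEnd_iff (cells : List String) (k : Nat) :
    k + 2 ≤ runEnd cells k ↔
      (k < cells.length ∧ cells.getD k "" ≠ "." ∧ k + 1 < cells.length ∧ cells.getD (k + 1) "" ≠ ".") := by
  constructor
  · intro h
    have h1 := mem_of_lt_runEnd cells k k (le_refl k) (by omega)
    have h2 := mem_of_lt_runEnd cells k (k + 1) (by omega) (by omega)
    exact ⟨h1.1, h1.2, h2.1, h2.2⟩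
  · rintro ⟨a, b, c, d⟩
    rw [runEnd_eq cells k, if_pos ⟨a, b⟩, runEnd_eq cells (k + 1), if_pos ⟨c, d⟩]
    have := le_runEnd cells (k + 2); omega

-- membership in runsFrom, at every call site the outer while actually reaches
theorem mem_runsFrom (cells : List String) (i : Nat) (s e : Nat)
    (hinv : i = 0 ∨ cells.length ≤ i ∨ cells.getD i "" = "." ∨ cells.getD (i - 1) "" = ".") :
    (s, e) ∈ runsFrom cells i ↔
      (i ≤ s ∧ s < cells.length ∧ cells.getD s "" ≠ "." ∧
       (s = 0 ∨ cells.getD (s - 1) "" = ".") ∧ e = runEnd cells s) := by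
  by_cases hilen : i < cells.length
  · by_cases hdot : cells.getD i "" = "."
    · rw [runsFrom_eq, if_pos hilen, if_pos hdot]
      rw [mem_runsFrom cells (i + 1) s e (Or.inr (Or.inr (Or.inr (by simpa using hdot))))]
      constructor
      · rintro ⟨a, b, c, d, f⟩; exact ⟨by omega, b, c, d, f⟩
      · rintro ⟨a, b, c, d, f⟩
        refine ⟨?_, b, c, d, f⟩
        rcases Nat.eq_or_lt_of_le a with rfl | h
        · exact absurd hdot c
        · omega
    · rw [runsFrom_eq, if_pos hilen, if_neg hdot]
      have hstart : i = 0 ∨ cells.getD (i - 1) "" = "." := by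
        rcases hinv with h | h | h | h
        · exact Or.inl h
        · omega
        · exact absurd h hdot
        · exact Or.inr h
      have hinv2 : runEnd cells i = 0 ∨ cells.length ≤ runEnd cells i ∨
          cells.getD (runEnd cells i) "" = "." ∨ cells.getD (runEnd cells i - 1) "" = "." := by
        rcases runEnd_stop cells i with h | h
        · exact Or.inr (Or.inl h)
        · exact Or.inr (Or.inr (Or.inl h))
      rw [List.mem_cons, mem_runsFrom cells (runEnd cells i) s e hinv2]
      constructor
      · rintro (heq | ⟨a, b, c, d, f⟩)
        · rw [Prod.mk.injEq] at heq
          obtain ⟨rfl, rfl⟩ := heq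
          exact ⟨le_refl s, hilen, hdot, hstart, rfl⟩
        · exact ⟨le_trans (le_runEnd cells i) a, b, c, d, f⟩
      · rintro ⟨a, b, c, d, f⟩
        rcases Nat.eq_or_lt_of_le a with rfl | hlt
        · exact Or.inl (by rw [Prod.mk.injEq]; exact ⟨rfl, f⟩)
        · refine Or.inr ⟨?_, b, c, d, f⟩
          by_contra hno
          rw [not_le] at hno
          have hm := mem_of_lt_runEnd cells i (s - 1) (by omega) (by omega)
          rcases d with rfl | hd
          · omega
          · exact hm.2 hd
  · rw [runsFrom_eq, if_neg hilen]
    simp only [List.not_mem_nil, false_iff]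
    rintro ⟨a, b, -⟩
    omega
termination_by cells.length - i
decreasing_by
  · omega
  · have := lt_runEnd cells i hilen hdot; omega

theorem exists_run_mem (cells : List String) (k : Nat) (h1 : k < cells.length)
    (h2 : cells.getD k "" ≠ ".") :
    ∃ s, (s, runEnd cells s) ∈ runsFrom cells 0 ∧ s ≤ k ∧ k < runEnd cells s := by
  induction k with
  | zero =>
    refine ⟨0, ?_, le_refl 0, lt_runEnd cells 0 h1 h2⟩
    rw [mem_runsFrom cells 0 0 _ (Or.inl rfl)]
    exact ⟨le_refl 0, h1, h2, Or.inl rfl, rfl⟩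
  | succ m ih =>
    by_cases hd : cells.getD m "" = "."
    · refine ⟨m + 1, ?_, le_refl _, lt_runEnd cells (m + 1) h1 h2⟩
      rw [mem_runsFrom cells 0 (m + 1) _ (Or.inl rfl)]
      exact ⟨by omega, h1, h2, Or.inr (by simpa using hd), rfl⟩
    · obtain ⟨s, hmem, hsk, hk⟩ := ih (by omega) hd
      refine ⟨s, hmem, by omega, ?_⟩
      rcases Nat.eq_or_lt_of_le (by omega : m + 1 ≤ runEnd cells s) with he | h
      · exfalso
        rcases runEnd_stop cells s with hs | hs
        · omega
        · rw [← he] at hs; exact h2 hs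
      · exact h

theorem lenFrom_eq_runEnd (cells : List String) (f : Nat → String) (limit i : Nat)
    (hl : cells.length = limit) (hf : ∀ t, t < limit → f t = cells.getD t "") :
    lenFrom f limit i = runEnd cells i - i := by
  rw [lenFrom]
  split
  · next hi =>
    rw [hf i hi]
    by_cases hd : cells.getD i "" = "."
    · rw [if_pos (by simpa using hd), runEnd_eq, if_neg (fun h => h.2 hd)]
      omega
    · rw [if_neg (by simpa using hd)]
      have hrec := lenFrom_eq_runEnd cells f limit (i + 1) hl hf
      have hre : runEnd cells i = runEnd cells (i + 1) := by
        conv_lhs => rw [runEnd_eq]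
        rw [if_pos ⟨by omega, hd⟩]
      have := le_runEnd cells (i + 1)
      rw [hrec, hre]
      omega
  · next hi =>
    rw [runEnd_eq, if_neg (fun h => hi (by omega))]
    omega
termination_by limit - i
decreasing_by omega

theorem intIdx_cons {α : Type} (a : α) (l : List α) (k : Int) (hk : k ≠ 0) :
    intIdx (a :: l) k = intIdx l (k - 1) := by
  unfold intIdx
  by_cases h0 : 0 ≤ k
  · rw [if_pos h0, if_pos (by omega)]
    have : k.toNat = (k - 1).toNat + 1 := by omega
    rw [this, List.getElem?_cons_succ]
  · rw [if_neg h0, if_neg (by omega)]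

theorem fcp_char (clue_num : Int) (grid : List (List String)) (h w : Nat)
    (ps : List (Nat × Nat)) (n : Int) :
    fcpLoop clue_num grid h w ps n = intIdx (ps.filter (isStart grid h w)) (clue_num - n) := by
  induction ps generalizing n with
  | nil => simp [fcpLoop, intIdx]
  | cons p rest ih =>
    obtain ⟨r, c⟩ := p
    simp only [fcpLoop]
    by_cases hdot : pvCell grid r c = "."
    · rw [if_pos (by simpa using hdot)]
      have hS : isStart grid h w (r, c) = false := by simp [isStart, hdot]
      simp only [List.filter_cons, hS, Bool.false_eq_true, if_false]
      exact ih n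
    · rw [if_neg (by simpa using hdot)]
      by_cases hst : (pvStartsAcross grid w r c || pvStartsDown grid h r c) = true
      · rw [if_pos hst]
        have hS : isStart grid h w (r, c) = true := by simp [isStart, hdot, hst]
        simp only [List.filter_cons, hS, if_true]
        by_cases heq : (n == clue_num) = true
        · rw [if_pos heq]
          have h0 : clue_num - n = 0 := by have := beq_iff_eq.mp heq; omega
          rw [h0]
          simp [intIdx]
        · rw [if_neg heq, ih (n + 1),
            intIdx_cons _ _ _ (by have : n ≠ clue_num := fun hc => heq (beq_iff_eq.mpr hc); omega)]
          congr 1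
          omega
      · rw [if_neg hst]
        have hst' : (pvStartsAcross grid w r c || pvStartsDown grid h r c) = false :=
          Bool.eq_false_iff.mpr (fun hh => hst hh)
        have hS : isStart grid h w (r, c) = false := by simp [isStart, hst']
        simp only [List.filter_cons, hS, Bool.false_eq_true, if_false]
        exact ih n

-- (grid.map f).getD r d for r < grid.length
theorem getD_map_lt {A B : Type} (f : A -> B) (l : List A) (r : Nat) (d : B) (d2 : A)
    (hr : r < l.length) : (l.map f).getD r d = f (l.getD r d2) := by
  rw [List.getD_eq_getElem?_getD, List.getD_eq_getElem?_getD, List.getElem?_map,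
    List.getElem?_eq_getElem hr]
  rfl

-- the sliced row of a wide-enough grid: length and cells
theorem sliceRow_take (row : List String) (w : Nat) : sliceRow row w = row.take w := by
  rw [sliceRow, PySem.List.slice_to row (by positivity)]
  norm_num

theorem sliceRow_length (row : List String) (w : Nat) (hw : w ≤ row.length) :
    (sliceRow row w).length = w := by
  rw [sliceRow_take, List.length_take]
  omega

theorem sliceRow_getD (row : List String) (w t : Nat) (ht : t < w) :
    (sliceRow row w).getD t "" = row.getD t "" := by
  rw [sliceRow_take, List.getD_eq_getElem?_getD, List.getD_eq_getElem?_getD,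
    List.getElem?_take_of_lt ht]

theorem colCells_length (grid : List (List String)) (h c : Nat) :
    (colCells grid h c).length = h := by
  simp [colCells]

theorem colCells_getD (grid : List (List String)) (h c t : Nat) (ht : t < h) :
    (colCells grid h c).getD t "" = pvCell grid t c :=
  PySem.List.getD_map_range _ h t "" ht

-- a row of a wide-enough grid really has width pvWidth grid
theorem row_wide (grid : List (List String)) (r : Nat)
    (hw : ∀ row ∈ grid, (grid.headD []).length ≤ row.length) (hr : r < grid.length) :
    pvWidth grid ≤ (grid.getD r []).length := by
  have hmem : grid.getD r [] ∈ grid := by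
    rw [List.getD_eq_getElem?_getD, List.getElem?_eq_getElem hr]
    exact List.getElem_mem hr
  have := hw _ hmem
  rw [pvWidth, if_pos (by omega)]
  exact this

-- membership in the across start-column list of row r
theorem across_mem (grid : List (List String)) (r a : Nat)
    (hw : ∀ row ∈ grid, (grid.headD []).length ≤ row.length) (hr : r < grid.length) :
    (a ∈ (((rowRunsOf grid (pvWidth grid)).getD r []).filter
        (fun se => decide (2 ≤ se.2 - se.1))).map (fun se => se.1)) ↔
      (pvCell grid r a ≠ "." ∧ pvStartsAcross grid (pvWidth grid) r a = true) := by
  have hlen : (sliceRow (grid.getD r []) (pvWidth grid)).length = pvWidth grid :=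
    sliceRow_length _ _ (row_wide grid r hw hr)
  set w := pvWidth grid with hwdef
  set cells := sliceRow (grid.getD r []) w with hcells
  have hget : ∀ t, t < w → cells.getD t "" = pvCell grid r t := fun t ht => sliceRow_getD _ _ _ ht
  have hrr : (rowRunsOf grid w).getD r [] = runsFrom cells 0 := by
    rw [rowRunsOf, getD_map_lt _ grid r [] [] hr]
  rw [hrr]
  simp only [List.mem_map, List.mem_filter]
  constructor
  · rintro ⟨⟨s, e⟩, ⟨hmem, hle⟩, rfl⟩
    rw [mem_runsFrom cells 0 s e (Or.inl rfl)] at hmem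
    obtain ⟨-, hslen, hsd, hstart, rfl⟩ := hmem
    have h2 : s + 2 ≤ runEnd cells s := by
      have := le_runEnd cells s
      simp only [decide_eq_true_eq] at hle
      omega
    rw [two_le_runEnd_iff] at h2
    obtain ⟨-, -, hs1len, hs1d⟩ := h2
    refine ⟨by rw [← hget s (by omega)]; exact hsd, ?_⟩
    rw [pvStartsAcross]
    simp only [Bool.and_eq_true, Bool.or_eq_true, beq_iff_eq, decide_eq_true_eq, bne_iff_ne,
      ne_eq]
    refine ⟨⟨?_, by omega⟩, by rw [← hget (s + 1) (by omega)]; exact hs1d⟩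
    rcases hstart with rfl | hd
    · exact Or.inl rfl
    · exact Or.inr (by rw [← hget (s - 1) (by omega)]; exact hd)
  · rintro ⟨hcd, hA⟩
    rw [pvStartsAcross] at hA
    simp only [Bool.and_eq_true, Bool.or_eq_true, beq_iff_eq, decide_eq_true_eq, bne_iff_ne,
      ne_eq] at hA
    obtain ⟨⟨h0, h1w⟩, h1d⟩ := hA
    refine ⟨(a, runEnd cells a), ⟨?_, ?_⟩, rfl⟩
    · rw [mem_runsFrom cells 0 a _ (Or.inl rfl)]
      refine ⟨by omega, by omega, by rw [hget a (by omega)]; exact hcd, ?_, rfl⟩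
      rcases h0 with rfl | hd
      · exact Or.inl rfl
      · exact Or.inr (by rw [hget (a - 1) (by omega)]; exact hd)
    · have : a + 2 ≤ runEnd cells a := by
        rw [two_le_runEnd_iff]
        exact ⟨by omega, by rw [hget a (by omega)]; exact hcd, by omega,
          by rw [hget (a + 1) (by omega)]; exact h1d⟩
      simp only [decide_eq_true_eq]
      omega

-- membership in the down start-column list of row r
theorem down_mem (grid : List (List String)) (r a : Nat) (hr : r < grid.length) :
    (a ∈ (List.range (pvWidth grid)).filter
        (fun c => ((colRunsOf grid grid.length (pvWidth grid)).getD c []).any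
          (fun se => se.1 == r && decide (2 ≤ se.2 - se.1)))) ↔
      (a < pvWidth grid ∧ pvCell grid r a ≠ "." ∧
        pvStartsDown grid grid.length r a = true) := by
  set h := grid.length with hhdef
  set w := pvWidth grid with hwdef
  set cells := colCells grid h a with hcells
  have hlen : cells.length = h := colCells_length grid h a
  have hget : ∀ t, t < h → cells.getD t "" = pvCell grid t a :=
    fun t ht => colCells_getD grid h a t ht
  simp only [List.mem_filter, List.mem_range]
  constructor
  · rintro ⟨haw, hany⟩
    have hcr : (colRunsOf grid h w).getD a [] = runsFrom cells 0 := by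
      rw [colRunsOf, PySem.List.getD_map_range _ w a [] haw]
    rw [hcr, List.any_eq_true] at hany
    obtain ⟨⟨s, e⟩, hmem, hpred⟩ := hany
    simp only [Bool.and_eq_true, beq_iff_eq, decide_eq_true_eq] at hpred
    obtain ⟨hsr, hle⟩ := hpred
    rw [mem_runsFrom cells 0 s e (Or.inl rfl)] at hmem
    obtain ⟨-, hslen, hsd, hstart, rfl⟩ := hmem
    have h2 : s + 2 ≤ runEnd cells s := by
      have := le_runEnd cells s
      omega
    rw [two_le_runEnd_iff] at h2
    obtain ⟨-, -, hs1len, hs1d⟩ := h2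
    subst hsr
    refine ⟨haw, by rw [← hget s (by omega)]; exact hsd, ?_⟩
    rw [pvStartsDown]
    simp only [Bool.and_eq_true, Bool.or_eq_true, beq_iff_eq, decide_eq_true_eq, bne_iff_ne,
      ne_eq]
    refine ⟨⟨?_, by omega⟩, by rw [← hget (s + 1) (by omega)]; exact hs1d⟩
    rcases hstart with rfl | hd
    · exact Or.inl rfl
    · exact Or.inr (by rw [← hget (s - 1) (by omega)]; exact hd)
  · rintro ⟨haw, hcd, hD⟩
    rw [pvStartsDown] at hD
    simp only [Bool.and_eq_true, Bool.or_eq_true, beq_iff_eq, decide_eq_true_eq, bne_iff_ne,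
      ne_eq] at hD
    obtain ⟨⟨h0, h1h⟩, h1d⟩ := hD
    refine ⟨haw, ?_⟩
    have hcr : (colRunsOf grid h w).getD a [] = runsFrom cells 0 := by
      rw [colRunsOf, PySem.List.getD_map_range _ w a [] haw]
    rw [hcr, List.any_eq_true]
    refine ⟨(r, runEnd cells r), ?_, ?_⟩
    · rw [mem_runsFrom cells 0 r _ (Or.inl rfl)]
      refine ⟨by omega, by omega, by rw [hget r (by omega)]; exact hcd, ?_, rfl⟩
      rcases h0 with rfl | hd
      · exact Or.inl rfl
      · exact Or.inr (by rw [hget (r - 1) (by omega)]; exact hd)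
    · have : r + 2 ≤ runEnd cells r := by
        rw [two_le_runEnd_iff]
        exact ⟨by omega, by rw [hget r (by omega)]; exact hcd, by omega,
          by rw [hget (r + 1) (by omega)]; exact h1d⟩
      simp only [Bool.and_eq_true, beq_iff_eq, decide_eq_true_eq]
      exact ⟨by trivial, by omega⟩

theorem rowStartCols_eq (grid : List (List String)) (r : Nat)
    (hw : ∀ row ∈ grid, (grid.headD []).length ≤ row.length) (hr : r < grid.length) :
    rowStartCols (rowRunsOf grid (pvWidth grid)) (colRunsOf grid grid.length (pvWidth grid))
      (pvWidth grid) r =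
    (List.range (pvWidth grid)).filter
      (fun c => isStart grid grid.length (pvWidth grid) (r, c)) := by
  rw [rowStartCols]
  apply PySem.List.sorted_eq_of_perm_of_pairwise_lt
  · rw [List.perm_ext_iff_of_nodup
      (List.Nodup.filter _ List.nodup_range)
      (PySem.Set.nodup_union _ _ (PySem.Set.nodup_ofList _))]
    intro a
    rw [PySem.Set.mem_union, PySem.Set.mem_ofList, PySem.Set.mem_ofList,
      across_mem grid r a hw hr, down_mem grid r a hr]
    simp only [List.mem_filter, List.mem_range, isStart, Bool.and_eq_true, Bool.or_eq_true,
      bne_iff_ne, ne_eq]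
    constructor
    · rintro ⟨haw, hcd, hA | hD⟩
      · exact Or.inl ⟨hcd, hA⟩
      · exact Or.inr ⟨haw, hcd, hD⟩
    · rintro (⟨hcd, hA⟩ | ⟨haw, hcd, hD⟩)
      · refine ⟨?_, hcd, Or.inl hA⟩
        rw [pvStartsAcross] at hA
        simp only [Bool.and_eq_true, decide_eq_true_eq] at hA
        omega
      · exact ⟨haw, hcd, Or.inr hD⟩
  · exact List.Pairwise.filter _ List.pairwise_lt_range

theorem starts_eq (grid : List (List String))
    (hw : ∀ row ∈ grid, (grid.headD []).length ≤ row.length) :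
    (List.range grid.length).foldl
      (fun acc r => acc ++ (rowStartCols (rowRunsOf grid (pvWidth grid))
        (colRunsOf grid grid.length (pvWidth grid)) (pvWidth grid) r).map (fun c => (r, c))) [] =
    (pvPairs grid.length (pvWidth grid)).filter (isStart grid grid.length (pvWidth grid)) := by
  rw [PySem.List.foldl_append_eq_flatMap, List.nil_append, pvPairs, List.filter_flatMap]
  apply List.flatMap_congr
  intro r hrmem
  rw [List.mem_range] at hrmem
  rw [rowStartCols_eq grid r hw hrmem, List.filter_map]
  rfl

theorem mem_pvPairs (h w r c : Nat) : ((r, c) ∈ pvPairs h w) ↔ (r < h ∧ c < w) := by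
  rw [pvPairs, List.mem_flatMap]
  constructor
  · rintro ⟨a, ha, hm⟩
    rw [List.mem_map] at hm
    obtain ⟨b, hb, heq⟩ := hm
    rw [Prod.mk.injEq] at heq
    obtain ⟨rfl, rfl⟩ := heq
    exact ⟨List.mem_range.mp ha, List.mem_range.mp hb⟩
  · rintro ⟨hr, hc⟩
    exact ⟨r, List.mem_range.mpr hr, List.mem_map.mpr ⟨c, List.mem_range.mpr hc, rfl⟩⟩

-- the two length computations agree on any numbered start cell: across direction
theorem length_across_eq (grid : List (List String)) (row col : Nat)
    (hw : ∀ r ∈ grid, (grid.headD []).length ≤ r.length) (hrow : row < grid.length)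
    (hcol : col < pvWidth grid) (hcd : pvCell grid row col ≠ ".") :
    (match ((rowRunsOf grid (pvWidth grid)).getD row []).find?
        (fun se => decide (se.1 ≤ col) && decide (col < se.2)) with
      | some se => (se.2 : Int) - (col : Int)
      | none => 0) =
    ((lenFrom (fun c => pvCell grid row c) (pvWidth grid) col : Nat) : Int) := by
  set w := pvWidth grid with hwdef
  have hlen : (sliceRow (grid.getD row []) w).length = w :=
    sliceRow_length _ _ (row_wide grid row hw hrow)
  set cells := sliceRow (grid.getD row []) w with hcells
  have hget : ∀ t, t < w → cells.getD t "" = pvCell grid row t :=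
    fun t ht => sliceRow_getD _ _ _ ht
  have hrr : (rowRunsOf grid w).getD row [] = runsFrom cells 0 := by
    rw [rowRunsOf, getD_map_lt _ grid row [] [] hrow]
  have hA : lenFrom (fun c => pvCell grid row c) w col = runEnd cells col - col :=
    lenFrom_eq_runEnd cells _ w col hlen (fun t ht => (hget t ht).symm)
  obtain ⟨s, hsmem, hsle, hslt⟩ :=
    exists_run_mem cells col (by omega) (by rw [hget col hcol]; exact hcd)
  rw [hrr]
  cases hfind : (runsFrom cells 0).find? (fun se => decide (se.1 ≤ col) && decide (col < se.2)) with
  | none =>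
    exfalso
    have := List.find?_eq_none.mp hfind _ hsmem
    simp only [Bool.and_eq_true, decide_eq_true_eq, not_and] at this
    exact absurd hslt (this hsle)
  | some se =>
    obtain ⟨s0, e0⟩ := se
    have hp := List.find?_some hfind
    simp only [Bool.and_eq_true, decide_eq_true_eq] at hp
    have hm := List.mem_of_find?_eq_some hfind
    rw [mem_runsFrom cells 0 s0 e0 (Or.inl rfl)] at hm
    obtain ⟨-, -, -, -, rfl⟩ := hm
    have hcongr : runEnd cells col = runEnd cells s0 :=
      runEnd_congr cells s0 col hp.1 hp.2
    rw [hA, ← hcongr]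
    show ((runEnd cells col : Int) - (col : Int)) = ((runEnd cells col - col : Nat) : Int)
    have := le_runEnd cells col
    omega

-- the two length computations agree on any numbered start cell: down direction
theorem length_down_eq (grid : List (List String)) (row col : Nat)
    (hrow : row < grid.length) (hcol : col < pvWidth grid)
    (hcd : pvCell grid row col ≠ ".") :
    (match ((colRunsOf grid grid.length (pvWidth grid)).getD col []).find?
        (fun se => decide (se.1 ≤ row) && decide (row < se.2)) with
      | some se => (se.2 : Int) - (row : Int)
      | none => 0) =
    ((lenFrom (fun r => pvCell grid r col) grid.length row : Nat) : Int) := by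
  set h := grid.length with hhdef
  set w := pvWidth grid with hwdef
  set cells := colCells grid h col with hcells
  have hlen : cells.length = h := colCells_length grid h col
  have hget : ∀ t, t < h → cells.getD t "" = pvCell grid t col :=
    fun t ht => colCells_getD grid h col t ht
  have hcr : (colRunsOf grid h w).getD col [] = runsFrom cells 0 := by
    rw [colRunsOf, PySem.List.getD_map_range _ w col [] hcol]
  have hA : lenFrom (fun r => pvCell grid r col) h row = runEnd cells row - row :=
    lenFrom_eq_runEnd cells _ h row hlen (fun t ht => (hget t ht).symm)
  obtain ⟨s, hsmem, hsle, hslt⟩ :=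
    exists_run_mem cells row (by omega) (by rw [hget row hrow]; exact hcd)
  rw [hcr]
  cases hfind : (runsFrom cells 0).find? (fun se => decide (se.1 ≤ row) && decide (row < se.2)) with
  | none =>
    exfalso
    have := List.find?_eq_none.mp hfind _ hsmem
    simp only [Bool.and_eq_true, decide_eq_true_eq, not_and] at this
    exact absurd hslt (this hsle)
  | some se =>
    obtain ⟨s0, e0⟩ := se
    have hp := List.find?_some hfind
    simp only [Bool.and_eq_true, decide_eq_true_eq] at hp
    have hm := List.mem_of_find?_eq_some hfind
    rw [mem_runsFrom cells 0 s0 e0 (Or.inl rfl)] at hm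
    obtain ⟨-, -, -, -, rfl⟩ := hm
    have hcongr : runEnd cells row = runEnd cells s0 :=
      runEnd_congr cells s0 row hp.1 hp.2
    rw [hA, ← hcongr]
    show ((runEnd cells row : Int) - (row : Int)) = ((runEnd cells row - row : Nat) : Int)
    have := le_runEnd cells row
    omega

-- ===== VERDICT =====
theorem fill_answer_spec : Claim_equal_fill_answer := by
  intro clue_num grid direction filled_grid answer _ hpre
  obtain ⟨hw, -⟩ := hpre
  unfold Spec_fill_answer fill_answer fill_answer_alt
  dsimp only
  rw [starts_eq grid hw, fcp_char]
  set f := (pvPairs grid.length (pvWidth grid)).filter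
    (isStart grid grid.length (pvWidth grid)) with hf
  by_cases hb : 1 ≤ clue_num ∧ clue_num ≤ (f.length : Int)
  · rw [if_pos hb]
    have hlt : (clue_num - 1).toNat < f.length := by omega
    rcases hrc : f.getD (clue_num - 1).toNat (0, 0) with ⟨row, col⟩
    have hidx : intIdx f (clue_num - 1) = some (row, col) := by
      rw [intIdx, if_pos (by omega), List.getElem?_eq_getElem hlt, ← hrc,
        List.getD_eq_getElem?_getD, List.getElem?_eq_getElem hlt]
      rfl
    simp only [hidx]
    have hmem : (row, col) ∈ f := by
      rw [← hrc, List.getD_eq_getElem?_getD, List.getElem?_eq_getElem hlt]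
      exact List.getElem_mem hlt
    rw [hf, List.mem_filter] at hmem
    obtain ⟨hpair, hstart⟩ := hmem
    rw [mem_pvPairs] at hpair
    have hcd : pvCell grid row col ≠ "." := by
      rw [isStart, Bool.and_eq_true, bne_iff_ne] at hstart
      exact hstart.1
    by_cases hdir : (direction == "across") = true
    · rw [if_pos hdir, if_pos hdir,
        length_across_eq grid row col hw hpair.1 hpair.2 hcd]
    · rw [if_neg hdir, if_neg hdir,
        length_down_eq grid row col hpair.1 hpair.2 hcd]
  · rw [if_neg hb]
    have hnone : intIdx f (clue_num - 1) = none := by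
      rw [intIdx]
      split
      · exact List.getElem?_eq_none (by omega)
      · rfl
    rw [hnone]
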